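-- pv_equiv track=rewrite | github.com/Kinshua/Siren | core/intelligence/deep_fingerprint.py | _version_in_range
-- ===== SOURCE A (Python) =====
-- def _version_in_range(version: str, range_str: str) -> bool:
--     """Check if version matches range like '< 1.25.0' or '>= 2.0.0'."""
--     range_str = range_str.strip()
--     parts = range_str.split(None, 1)
--     if len(parts) != 2:
--         return False
--     op, target = parts[0], parts[1]
--
--     try:
--         v_parts = [int(x) for x in version.split(".")]
--         t_parts = [int(x) for x in target.split(".")]
--     except (ValueError, AttributeError):
--         return False
--
--     # Pad to same length
--     max_len = max(len(v_parts), len(t_parts))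
--     v_parts.extend([0] * (max_len - len(v_parts)))
--     t_parts.extend([0] * (max_len - len(t_parts)))
--
--     if op == "<":
--         return v_parts < t_parts
--     elif op == "<=":
--         return v_parts <= t_parts
--     elif op == ">":
--         return v_parts > t_parts
--     elif op == ">=":
--         return v_parts >= t_parts
--     elif op == "==":
--         return v_parts == t_parts
--     return False
-- ===== SOURCE B (Python) =====
-- def _cmp_parts(v, t):
--     # three-way compare, missing components count as 0
--     while v or t:
--         a = v[0] if v else 0
--         b = t[0] if t else 0
--         if a != b:
--             return -1 if a < b else 1
--         v, t = v[1:], t[1:]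
--     return 0
--
--
-- _OP_TABLE = {"<": (-1,), "<=": (-1, 0), ">": (1,), ">=": (0, 1), "==": (0,)}
--
--
-- def _version_in_range(version: str, range_str: str) -> bool:
--     """Check if version matches range like '< 1.25.0' or '>= 2.0.0'."""
--     range_str = range_str.strip()
--     parts = range_str.split(None, 1)
--     if len(parts) != 2:
--         return False
--     op, target = parts[0], parts[1]
--
--     try:
--         v_parts = [int(x) for x in version.split(".")]
--         t_parts = [int(x) for x in target.split(".")]
--     except (ValueError, AttributeError):
--         return False
--
--     cmp = _cmp_parts(v_parts, t_parts)
--     return cmp in _OP_TABLE.get(op, ())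
-- ===== Notes on version B (the rewrite author's own statement) =====
-- stated objective: simpler
-- what changed: B keeps A's parsing preamble but replaces padding both part-lists and five separate lexicographic list comparisons by one three-way scan over the pairs (missing components read as 0) that computes a single comparison sign, dispatched through an operator-to-allowed-signs table.
import Mathlib
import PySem

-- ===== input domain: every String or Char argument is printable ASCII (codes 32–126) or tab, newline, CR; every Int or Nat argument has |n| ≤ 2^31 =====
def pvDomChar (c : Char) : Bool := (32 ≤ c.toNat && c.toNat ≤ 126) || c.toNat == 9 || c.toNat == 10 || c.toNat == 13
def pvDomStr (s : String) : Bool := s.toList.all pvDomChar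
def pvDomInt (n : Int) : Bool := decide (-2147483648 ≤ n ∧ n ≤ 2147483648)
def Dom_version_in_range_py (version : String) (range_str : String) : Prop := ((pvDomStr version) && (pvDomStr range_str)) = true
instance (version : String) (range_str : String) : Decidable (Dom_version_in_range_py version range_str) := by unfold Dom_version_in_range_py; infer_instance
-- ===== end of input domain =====

-- B replaces padding both lists plus five list comparisons by one three-way scan
-- (missing components read as 0) and a table lookup; objective: simpler decomposition.

-- ===== PORT A =====
-- [int(x) for x in s.split(".")], none = ValueError
def pyIntsOf (s : String) : Option (List Int) :=
  ((PySem.Str.split? s ".").getD []).mapM PySem.Int.ofStr?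

-- Python's `<` on two int lists (lexicographic)
def pyListLt : List Int → List Int → Bool
  | [], [] => false
  | [], _ :: _ => true
  | _ :: _, [] => false
  | a :: as, b :: bs => decide (a < b) || (a == b && pyListLt as bs)

-- Python's `<=` on two int lists (lexicographic)
def pyListLe : List Int → List Int → Bool
  | [], _ => true
  | _ :: _, [] => false
  | a :: as, b :: bs => decide (a < b) || (a == b && pyListLe as bs)

def version_in_range_py (version : String) (range_str : String) : Bool :=
  let rs := PySem.Str.strip range_str
  let parts := PySem.Str.split₀Max rs 1
  if parts.length ≠ 2 then false
  else
    let op := parts.getD 0 ""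
    let target := parts.getD 1 ""
    match pyIntsOf version, pyIntsOf target with
    | some vp, some tp =>
      -- pad to same length
      let maxLen := max vp.length tp.length
      let v := vp ++ List.replicate (maxLen - vp.length) (0 : Int)
      let t := tp ++ List.replicate (maxLen - tp.length) (0 : Int)
      if op == "<" then pyListLt v t
      else if op == "<=" then pyListLe v t
      else if op == ">" then pyListLt t v   -- v > t  ⟺  t < v in Python
      else if op == ">=" then pyListLe t v  -- v >= t ⟺  t <= v in Python
      else if op == "==" then v == t
      else false
    | _, _ => false

-- ===== PORT B =====
-- [int(x) for x in s.split(".")], none = ValueError (B keeps A's parsing preamble)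
def pyIntsOfB (s : String) : Option (List Int) :=
  ((PySem.Str.split? s ".").getD []).mapM PySem.Int.ofStr?

-- three-way compare, missing components count as 0 (B's while loop over both lists)
def cmpParts : List Int → List Int → Int
  | [], [] => 0
  | a :: as, b :: bs => if a ≠ b then (if a < b then -1 else 1) else cmpParts as bs
  | [], b :: bs => if (0 : Int) ≠ b then (if (0 : Int) < b then -1 else 1) else cmpParts [] bs
  | a :: as, [] => if a ≠ 0 then (if a < 0 then -1 else 1) else cmpParts as []

def opTable : PySem.Dict String (List Int) :=
  PySem.Dict.ofList [("<", [-1]), ("<=", [-1, 0]), (">", [1]), (">=", [0, 1]), ("==", [0])]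

def version_in_range_py_alt (version : String) (range_str : String) : Bool :=
  let rs := PySem.Str.strip range_str
  let parts := PySem.Str.split₀Max rs 1
  if parts.length ≠ 2 then false
  else
    let op := parts.getD 0 ""
    let target := parts.getD 1 ""
    match pyIntsOfB version with
    | none => false
    | some vp =>
      match pyIntsOfB target with
      | none => false
      | some tp => (opTable.getD op []).contains (cmpParts vp tp)

-- ===== PRECONDITION & SPEC =====
def Spec_version_in_range_py (version : String) (range_str : String) (out : Bool) : Prop := out = version_in_range_py_alt version range_str
instance (version : String) (range_str : String) (out : Bool) : Decidable (Spec_version_in_range_py version range_str out) := by unfold Spec_version_in_range_py; infer_instance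

-- ===== CLAIM (what is proved, stated in full; the proofs are below) =====
def Claim_equal_version_in_range_py : Prop := ∀ (version : String) (range_str : String), Dom_version_in_range_py version range_str → Spec_version_in_range_py version range_str (version_in_range_py version range_str)

-- ===== LEMMAS AND PROOFS =====

theorem cmpParts_nil_replicate (q : Nat) : cmpParts [] (List.replicate q 0) = 0 := by
  induction q with
  | zero => simp [cmpParts]
  | succ n ih => simp [List.replicate, cmpParts, ih]

theorem cmpParts_replicate_nil (p : Nat) : cmpParts (List.replicate p 0) [] = 0 := by
  induction p with
  | zero => simp [cmpParts]
  | succ n ih => simp [List.replicate, cmpParts, ih]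

theorem cmpParts_nil_append (t : List Int) (q : Nat) :
    cmpParts [] (t ++ List.replicate q 0) = cmpParts [] t := by
  induction t with
  | nil => simp [cmpParts_nil_replicate q, cmpParts]
  | cons b bs ih =>
    by_cases h : (0 : Int) = b
    · subst h; simp [cmpParts, ih]
    · simp [cmpParts, h]

theorem cmpParts_append_nil (v : List Int) (p : Nat) :
    cmpParts (v ++ List.replicate p 0) [] = cmpParts v [] := by
  induction v with
  | nil => simp [cmpParts_replicate_nil p, cmpParts]
  | cons a as ih =>
    by_cases h : a = 0
    · subst h; simp [cmpParts, ih]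
    · simp [cmpParts, h]

theorem cmpParts_replicate_left (p : Nat) (t : List Int) :
    cmpParts (List.replicate p 0) t = cmpParts [] t := by
  induction p generalizing t with
  | zero => rfl
  | succ n ih =>
    cases t with
    | nil => simp [List.replicate, cmpParts, ih]
    | cons b bs =>
      by_cases h : (0 : Int) = b
      · subst h; simp [List.replicate, cmpParts, ih]
      · simp [List.replicate, cmpParts, h, Ne.symm h]

theorem cmpParts_replicate_right (q : Nat) (v : List Int) :
    cmpParts v (List.replicate q 0) = cmpParts v [] := by
  induction q generalizing v with
  | zero => rfl
  | succ n ih =>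
    cases v with
    | nil => simp [List.replicate, cmpParts, ih]
    | cons a as =>
      by_cases h : a = 0
      · subst h; simp [List.replicate, cmpParts, ih]
      · simp [List.replicate, cmpParts, h]

-- padding with zeros on either side does not change the three-way comparison
theorem cmpParts_pad (v t : List Int) (p q : Nat) :
    cmpParts (v ++ List.replicate p 0) (t ++ List.replicate q 0) = cmpParts v t := by
  induction v generalizing t with
  | nil =>
    simpa [cmpParts_replicate_left p] using cmpParts_nil_append t q
  | cons a as ih =>
    cases t with
    | nil =>
      rw [List.nil_append, cmpParts_replicate_right q]
      exact cmpParts_append_nil (a :: as) p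
    | cons b bs => by_cases h : a = b <;> simp [cmpParts, h, ih]

theorem cmpParts_swap (v t : List Int) : cmpParts t v = -cmpParts v t := by
  induction v generalizing t with
  | nil =>
    induction t with
    | nil => simp [cmpParts]
    | cons b bs ih =>
      by_cases h : (0 : Int) = b
      · subst h; simpa [cmpParts] using ih
      · have h' : b ≠ 0 := fun hb => h hb.symm
        rcases lt_or_gt_of_ne h' with hlt | hgt
        · simp [cmpParts, h, Ne.symm h, hlt, not_lt.mpr hlt.le, h']
        · simp [cmpParts, h, Ne.symm h, hgt, not_lt.mpr hgt.le, h']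
  | cons a as ih =>
    cases t with
    | nil =>
      by_cases h : a = 0
      · subst h; simpa [cmpParts] using ih []
      · rcases lt_or_gt_of_ne h with hlt | hgt
        · simp [cmpParts, h, Ne.symm h, hlt, not_lt.mpr hlt.le]
        · simp [cmpParts, h, Ne.symm h, hgt, not_lt.mpr hgt.le]
    | cons b bs =>
      by_cases h : a = b
      · subst h; simpa [cmpParts] using ih bs
      · rcases lt_or_gt_of_ne h with hlt | hgt
        · simp [cmpParts, h, Ne.symm h, hlt, not_lt.mpr hlt.le]
        · simp [cmpParts, h, Ne.symm h, hgt, not_lt.mpr hgt.le]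

theorem pyListLt_eq_cmp (v t : List Int) (h : v.length = t.length) :
    pyListLt v t = (cmpParts v t == -1) := by
  induction v generalizing t with
  | nil => cases t with
    | nil => simp [pyListLt, pyListLe, cmpParts]
    | cons b bs => simp at h
  | cons a as ih =>
    cases t with
    | nil => simp at h
    | cons b bs =>
      simp only [List.length_cons, Nat.add_right_cancel_iff] at h
      by_cases hab : a = b
      · simp [pyListLt, cmpParts, hab, ih bs h, lt_irrefl]
      · rcases lt_or_gt_of_ne hab with hlt | hgt
        · simp [pyListLt, cmpParts, hab, hlt]
        · simp [pyListLt, cmpParts, hab, hgt, not_lt.mpr hgt.le]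

theorem pyListLe_eq_cmp (v t : List Int) (h : v.length = t.length) :
    pyListLe v t = (cmpParts v t == -1 || cmpParts v t == 0) := by
  induction v generalizing t with
  | nil => cases t with
    | nil => simp [pyListLt, pyListLe, cmpParts]
    | cons b bs => simp at h
  | cons a as ih =>
    cases t with
    | nil => simp at h
    | cons b bs =>
      simp only [List.length_cons, Nat.add_right_cancel_iff] at h
      by_cases hab : a = b
      · simp [pyListLe, cmpParts, hab, ih bs h, lt_irrefl]
      · rcases lt_or_gt_of_ne hab with hlt | hgt
        · simp [pyListLe, cmpParts, hab, hlt]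
        · simp [pyListLe, cmpParts, hab, hgt, not_lt.mpr hgt.le]

theorem pyListEq_eq_cmp (v t : List Int) (h : v.length = t.length) :
    (v == t) = (cmpParts v t == 0) := by
  induction v generalizing t with
  | nil => cases t with
    | nil => simp [pyListLt, pyListLe, cmpParts]
    | cons b bs => simp at h
  | cons a as ih =>
    cases t with
    | nil => simp at h
    | cons b bs =>
      simp only [List.length_cons, Nat.add_right_cancel_iff] at h
      by_cases hab : a = b
      · simp [cmpParts, hab, ih bs h]
      · rcases lt_or_gt_of_ne hab with hlt | hgt
        · simp [cmpParts, hab, hlt]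
        · simp [cmpParts, hab, hgt, not_lt.mpr hgt.le]

theorem cmpParts_trich (v t : List Int) :
    cmpParts v t = -1 ∨ cmpParts v t = 0 ∨ cmpParts v t = 1 := by
  induction v generalizing t with
  | nil =>
    induction t with
    | nil => simp [cmpParts]
    | cons b bs ih =>
      by_cases h : (0 : Int) = b
      · subst h; simpa [cmpParts] using ih
      · simp only [cmpParts, if_pos h]
        split_ifs <;> simp
  | cons a as ih =>
    cases t with
    | nil =>
      by_cases h : a = 0
      · subst h; simpa [cmpParts] using ih []
      · simp only [cmpParts, if_pos h]
        split_ifs <;> simp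
    | cons b bs =>
      by_cases h : a = b
      · subst h; simpa [cmpParts] using ih bs
      · simp only [cmpParts, if_pos h]
        split_ifs <;> simp

theorem opTable_mk : opTable = PySem.Dict.mk
    [("<", [-1]), ("<=", [-1, 0]), (">", [1]), (">=", [0, 1]), ("==", [0])] := by decide

-- the core of the equivalence: A's five padded list comparisons against B's table lookup
theorem core_eq (op : String) (vp tp : List Int) :
    (if op == "<" then
        pyListLt (vp ++ List.replicate (max vp.length tp.length - vp.length) (0 : Int))
                 (tp ++ List.replicate (max vp.length tp.length - tp.length) (0 : Int))
      else if op == "<=" then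
        pyListLe (vp ++ List.replicate (max vp.length tp.length - vp.length) (0 : Int))
                 (tp ++ List.replicate (max vp.length tp.length - tp.length) (0 : Int))
      else if op == ">" then
        pyListLt (tp ++ List.replicate (max vp.length tp.length - tp.length) (0 : Int))
                 (vp ++ List.replicate (max vp.length tp.length - vp.length) (0 : Int))
      else if op == ">=" then
        pyListLe (tp ++ List.replicate (max vp.length tp.length - tp.length) (0 : Int))
                 (vp ++ List.replicate (max vp.length tp.length - vp.length) (0 : Int))
      else if op == "==" then
        ((vp ++ List.replicate (max vp.length tp.length - vp.length) (0 : Int))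
          == (tp ++ List.replicate (max vp.length tp.length - tp.length) (0 : Int)))
      else false)
    = (opTable.getD op []).contains (cmpParts vp tp) := by
  have hvlen : (vp ++ List.replicate (max vp.length tp.length - vp.length) (0 : Int)).length
      = (tp ++ List.replicate (max vp.length tp.length - tp.length) (0 : Int)).length := by
    simp [List.length_append, List.length_replicate]
  have hpad : cmpParts (vp ++ List.replicate (max vp.length tp.length - vp.length) (0 : Int))
      (tp ++ List.replicate (max vp.length tp.length - tp.length) (0 : Int)) = cmpParts vp tp :=
    cmpParts_pad vp tp _ _
  have hswap : cmpParts (tp ++ List.replicate (max vp.length tp.length - tp.length) (0 : Int))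
      (vp ++ List.replicate (max vp.length tp.length - vp.length) (0 : Int)) = -cmpParts vp tp := by
    rw [cmpParts_swap, hpad]
  rw [opTable_mk]
  by_cases h1 : op = "<"
  · rw [pyListLt_eq_cmp _ _ hvlen, hpad]
    rcases cmpParts_trich vp tp with h | h | h <;> simp [h1, h] <;> try decide
  by_cases h2 : op = "<="
  · rw [if_neg (by simp [h1]), if_pos (by simp [h2]), pyListLe_eq_cmp _ _ hvlen, hpad]
    rcases cmpParts_trich vp tp with h | h | h <;> simp [h2, h1, h] <;> try decide
  by_cases h3 : op = ">"
  · rw [if_neg (by simp [h1]), if_neg (by simp [h2]), if_pos (by simp [h3]),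
      pyListLt_eq_cmp _ _ hvlen.symm, hswap]
    rcases cmpParts_trich vp tp with h | h | h <;> simp [h3, h1, h2, h] <;> try decide
  by_cases h4 : op = ">="
  · rw [if_neg (by simp [h1]), if_neg (by simp [h2]), if_neg (by simp [h3]),
      if_pos (by simp [h4]), pyListLe_eq_cmp _ _ hvlen.symm, hswap]
    rcases cmpParts_trich vp tp with h | h | h <;> simp [h4, h1, h2, h3, h] <;> try decide
  by_cases h5 : op = "=="
  · rw [if_neg (by simp [h1]), if_neg (by simp [h2]), if_neg (by simp [h3]),
      if_neg (by simp [h4]), if_pos (by simp [h5]), pyListEq_eq_cmp _ _ hvlen, hpad]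
    rcases cmpParts_trich vp tp with h | h | h <;> simp [h5, h1, h2, h3, h4, h] <;> try decide
  · rw [if_neg (by simp [h1]), if_neg (by simp [h2]), if_neg (by simp [h3]),
      if_neg (by simp [h4]), if_neg (by simp [h5])]
    simp [PySem.Dict.getD_eq_get?_getD, PySem.Dict.get?_mk_cons, h1, h2, h3, h4, h5,
      Ne.symm h1, Ne.symm h2, Ne.symm h3, Ne.symm h4, Ne.symm h5, PySem.Dict.get?_empty]
    have : PySem.Dict.mk ([] : List (String × List Int)) = PySem.Dict.empty := rfl
    simp [this, PySem.Dict.get?_empty]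

-- ===== VERDICT (by name: the statement is the Claim_ definition above) =====
theorem pyIntsOfB_eq (s : String) : pyIntsOfB s = pyIntsOf s := rfl

theorem version_in_range_py_spec : Claim_equal_version_in_range_py := by
  intro version range_str _
  unfold Spec_version_in_range_py version_in_range_py version_in_range_py_alt
  simp only
  by_cases hlen : (PySem.Str.split₀Max (PySem.Str.strip range_str) 1).length ≠ 2
  · rw [if_pos hlen, if_pos hlen]
  · rw [if_neg hlen, if_neg hlen]
    rcases hv : pyIntsOf version with _ | vp <;>
      rcases ht : pyIntsOf
        ((PySem.Str.split₀Max (PySem.Str.strip range_str) 1).getD 1 "") with _ | tp <;>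
      simp only [pyIntsOfB_eq, hv, ht]
    exact core_eq _ vp tp
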